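-- pv_equiv track=rewrite | github.com/alla1101/AI1Berkley-Benghazi | PathPlanning/TestingAlgorithms.py | combineStrings
-- ===== SOURCE A (Python) =====
-- def combineStrings(a,b):
--     if len(b):
--         solution=[]
--     else:
--         return a
--     for x in a:
--         for y in b:
--             solution.append((f"{x},{y}").replace(" ",""))
--     return solution
-- ===== SOURCE B (Python) =====
-- def combineStrings(a, b):
--     if not b:
--         return a
--     nb = len(b)
--     n = len(a) * nb
--     out = []
--     k = 0
--     while k < n:
--         x = a[k // nb]
--         y = b[k % nb]
--         out.append("".join(c for c in f"{x},{y}" if c != " "))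
--         k += 1
--     return out
-- ===== Notes on version B (the rewrite author's own statement) =====
-- stated objective: alternative
-- what changed: B replaces A's nested for-loops with a single flat while-loop over k in [0, len(a)*len(b)), recovering the pair by arithmetic indexing (k//len(b), k%len(b)), and strips spaces with a character filter instead of str.replace.
import Mathlib
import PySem

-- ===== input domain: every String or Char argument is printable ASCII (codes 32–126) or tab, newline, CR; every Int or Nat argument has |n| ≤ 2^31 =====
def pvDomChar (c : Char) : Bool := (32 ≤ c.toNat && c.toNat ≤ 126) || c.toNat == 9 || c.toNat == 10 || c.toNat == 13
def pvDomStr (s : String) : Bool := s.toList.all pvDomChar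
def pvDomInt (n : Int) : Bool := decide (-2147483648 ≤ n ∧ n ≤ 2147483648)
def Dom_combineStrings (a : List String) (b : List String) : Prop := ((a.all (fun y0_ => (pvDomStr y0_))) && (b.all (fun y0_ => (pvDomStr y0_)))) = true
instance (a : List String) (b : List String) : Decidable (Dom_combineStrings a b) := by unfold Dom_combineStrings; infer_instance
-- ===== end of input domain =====

-- B replaces A's nested loops by one flat while-loop over k < len(a)*len(b), recovering the
-- pair by arithmetic indexing (k // len(b), k % len(b)) and stripping spaces by a char filter.

-- ===== PORT A =====
def combineStrings (a : List String) (b : List String) : List String :=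
  if b.length ≠ 0 then
    -- solution = []; for x in a: for y in b: solution.append((f"{x},{y}").replace(" ",""))
    a.foldl (fun solution x =>
      b.foldl (fun solution y =>
        solution ++ [String.ofList (PySem.Chars.replace (x.toList ++ [','] ++ y.toList) [' '] [])])
        solution) []
  else a

-- ===== PORT B =====
-- one loop-body value: x = a[k // nb]; y = b[k % nb]; "".join(c for c in f"{x},{y}" if c != " ")
-- (k and nb are nonnegative, so Python's // and % are Nat division/mod; the loop bound keeps
--  both indices in range, so pyGet? is some — .getD "" is never taken on Python's inputs)
def pvPairAt (a b : List String) (nb k : Nat) : String :=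
  let x := (PySem.List.pyGet? a ((k / nb : Nat) : Int)).getD ""
  let y := (PySem.List.pyGet? b ((k % nb : Nat) : Int)).getD ""
  String.ofList ((x.toList ++ [','] ++ y.toList).filter (fun c => c != ' '))

-- while k < n: out.append(pvPairAt k); k += 1
def pvAltGo (a b : List String) (nb n k : Nat) : List String :=
  if k < n then pvPairAt a b nb k :: pvAltGo a b nb n (k + 1) else []
termination_by n - k

def combineStrings_alt (a : List String) (b : List String) : List String :=
  if b = [] then a
  else pvAltGo a b b.length (a.length * b.length) 0

-- ===== PRECONDITION & SPEC =====
def Spec_combineStrings (a : List String) (b : List String) (out : List String) : Prop := out = combineStrings_alt a b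
instance (a : List String) (b : List String) (out : List String) : Decidable (Spec_combineStrings a b out) := by unfold Spec_combineStrings; infer_instance

-- ===== CLAIM (what is proved, stated in full; the proofs are below) =====
def Claim_equal_combineStrings : Prop := ∀ (a : List String) (b : List String), Dom_combineStrings a b → Spec_combineStrings a b (combineStrings a b)

-- ===== LEMMAS AND PROOFS =====

-- the pair built at index k = i*nb + j (i, j in range) is the filtered concatenation of a[i], b[j]
def pvG (x y : String) : String :=
  String.ofList ((x.toList ++ [','] ++ y.toList).filter (fun c => c != ' '))

theorem pvPairAt_eq (a b : List String) (i j : Nat) (hi : i < a.length) (hj : j < b.length) :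
    pvPairAt a b b.length (i * b.length + j) = pvG a[i] b[j] := by
  have hnb : 0 < b.length := by omega
  have hdiv : (i * b.length + j) / b.length = i := by
    rw [Nat.add_comm, Nat.add_mul_div_right _ _ hnb, Nat.div_eq_of_lt hj]; omega
  have hmod : (i * b.length + j) % b.length = j := by
    rw [Nat.add_comm, Nat.add_mul_mod_self_right, Nat.mod_eq_of_lt hj]
  unfold pvPairAt pvG
  rw [hdiv, hmod]
  simp [PySem.List.pyGet?_natCast, List.getElem?_eq_getElem hi, List.getElem?_eq_getElem hj]

-- inner phase: from k = i*nb + j the loop emits b[j..] paired with a[i], then continues at (i+1)*nb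
theorem pvAltGo_inner (a b : List String) (i j : Nat) (hi : i < a.length) (hj : j ≤ b.length) :
    pvAltGo a b b.length (a.length * b.length) (i * b.length + j)
      = (b.drop j).map (pvG a[i]) ++ pvAltGo a b b.length (a.length * b.length) ((i + 1) * b.length) := by
  rcases Nat.lt_or_ge j b.length with hjlt | hjge
  · have hk : i * b.length + j < a.length * b.length := by
      calc i * b.length + j < i * b.length + b.length := by omega
        _ = (i + 1) * b.length := by ring
        _ ≤ a.length * b.length := Nat.mul_le_mul_right _ (by omega)
    rw [pvAltGo, if_pos hk, pvPairAt_eq a b i j hi hjlt,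
        List.drop_eq_getElem_cons hjlt, List.map_cons]
    have : i * b.length + j + 1 = i * b.length + (j + 1) := by omega
    rw [this, pvAltGo_inner a b i (j + 1) hi (by omega)]
    simp
  · have hje : j = b.length := le_antisymm hj hjge
    subst hje
    have : i * b.length + b.length = (i + 1) * b.length := by ring
    rw [this]
    simp [List.drop_of_length_le (le_refl b.length)]
termination_by b.length - j

-- outer phase: from k = i*nb the loop emits the full product over a[i..]
theorem pvAltGo_outer (a b : List String) (i : Nat) (hi : i ≤ a.length) :
    pvAltGo a b b.length (a.length * b.length) (i * b.length)
      = (a.drop i).flatMap (fun x => b.map (pvG x)) := by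
  rcases Nat.lt_or_ge i a.length with hlt | hge
  · have h0 : i * b.length = i * b.length + 0 := by omega
    rw [h0, pvAltGo_inner a b i 0 hlt (Nat.zero_le _), List.drop_zero,
        pvAltGo_outer a b (i + 1) (by omega),
        List.drop_eq_getElem_cons hlt, List.flatMap_cons]
  · have : i = a.length := le_antisymm hi hge
    subst this
    rw [pvAltGo, if_neg (by omega)]
    simp [List.drop_of_length_le (le_refl a.length)]
termination_by a.length - i

-- replace.go with old = [' '], new = [] consumes one char per unit of fuel:
-- with fuel ≥ |l| it is a space filter.
theorem pv_go_filter (fuel : Nat) (l acc : List Char) (h : l.length ≤ fuel) :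
    PySem.Chars.replace.go [' '] [] fuel l acc = acc.reverse ++ l.filter (fun c => c != ' ') := by
  induction fuel generalizing l acc with
  | zero =>
    cases l with
    | nil => simp [PySem.Chars.replace.go]
    | cons c t => simp at h
  | succ fuel ih =>
    cases l with
    | nil => simp [PySem.Chars.replace.go]
    | cons c t =>
      by_cases hc : c = ' '
      · have hp : List.isPrefixOf [' '] (c :: t) = true := by
          rw [show List.isPrefixOf [' '] (c :: t) = ((' ' == c) && List.isPrefixOf ([]:List Char) t) from rfl,
              show List.isPrefixOf ([]:List Char) t = true from rfl]
          simp [hc]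
        rw [PySem.Chars.replace.go]
        simp only [hp, if_pos]
        rw [show List.drop [' '].length (c :: t) = t from rfl]
        rw [ih t ([].reverse ++ acc) (by simpa using h)]
        simp [hc]
      · have hp : List.isPrefixOf [' '] (c :: t) = false := by
          rw [show List.isPrefixOf [' '] (c :: t) = ((' ' == c) && List.isPrefixOf ([]:List Char) t) from rfl,
              show List.isPrefixOf ([]:List Char) t = true from rfl]
          simp only [Bool.and_true, beq_eq_false_iff_ne]
          exact fun h' => hc h'.symm
        rw [PySem.Chars.replace.go]
        simp only [hp, if_neg, Bool.false_eq_true, not_false_iff]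
        rw [ih t (c :: acc) (by simpa using h)]
        simp [hc]

-- A's per-pair replace(" ","") is a space filter over the concatenation.
theorem pv_replace_space (s : List Char) :
    PySem.Chars.replace s [' '] [] = s.filter (fun c => c != ' ') := by
  rw [PySem.Chars.replace]
  simp [pv_go_filter s.length s [] le_rfl]

-- A's nested append-loop over a and b is the flatMap/map product.
theorem pv_nested_foldl (g : String → String → String) (a b init : List String) :
    a.foldl (fun sol x => b.foldl (fun sol y => sol ++ [g x y]) sol) init
      = init ++ a.flatMap (fun x => b.map (g x)) := by
  induction a generalizing init with
  | nil => simp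
  | cons x at' ih =>
    simp only [List.foldl_cons, List.flatMap_cons]
    rw [PySem.List.foldl_append_singleton_eq_map, ih, List.append_assoc]

-- ===== VERDICT (by name: the statement is the Claim_ definition above) =====
theorem combineStrings_spec : Claim_equal_combineStrings := by
  unfold Claim_equal_combineStrings
  intro a b _
  unfold Spec_combineStrings combineStrings combineStrings_alt
  cases b with
  | nil => simp
  | cons b0 bt =>
    rw [if_pos (by simp), if_neg (by simp)]
    rw [pv_nested_foldl]
    have h0 : 0 * (b0 :: bt).length = 0 := by omega
    rw [show (0 : Nat) = 0 * (b0 :: bt).length from h0.symm,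
        pvAltGo_outer a (b0 :: bt) 0 (Nat.zero_le _), List.drop_zero, List.nil_append]
    apply List.flatMap_congr
    intro x _
    apply List.map_congr_left
    intro y _
    simp [pvG, pv_replace_space]
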